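-- pv_equiv track=rewrite | github.com/MichaelRSilva/decision-tree-algorithms | utils/collection_util.py | get_data_permutations
-- ===== SOURCE A (Python) =====
-- from itertools import permutations
--
-- def get_data_permutations(data, metadata):
--     cols_quantity = len(data[0])
--     target_column = [row[cols_quantity - 1] for row in data]
--     all_index_permutations = list(permutations(range(cols_quantity - 1)))
--     dataset = []
--     metas = []
--
--     for options in all_index_permutations:
--         matrix = []
--         meta = []
--
--         for idx, col in enumerate(list(options)):
--             values = [row[col] for row in data]
--             matrix.append(values)
--             meta.append(metadata[col])
--
--         matrix.append(target_column)
--         dataset.append([[row[i] for row in matrix] for i in range(len(matrix[0]))])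
--
--         meta.append(metadata[cols_quantity - 1])
--         metas.append(meta)
--
--     return dataset, metas
-- ===== SOURCE B (Python) =====
-- from itertools import permutations
--
-- def get_data_permutations(data, metadata):
--     target = len(data[0]) - 1
--     dataset = []
--     metas = []
--     for options in permutations(range(target)):
--         dataset.append([[row[col] for col in options] + [row[target]] for row in data])
--         metas.append([metadata[col] for col in options] + [metadata[target]])
--     return dataset, metas
-- ===== Notes on version B (the rewrite author's own statement) =====
-- stated objective: simpler
-- what changed: B emits each permuted dataset row directly in row-major order (one comprehension per permutation), eliminating A's intermediate column-matrix construction and its explicit transpose loop.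
import Mathlib
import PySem

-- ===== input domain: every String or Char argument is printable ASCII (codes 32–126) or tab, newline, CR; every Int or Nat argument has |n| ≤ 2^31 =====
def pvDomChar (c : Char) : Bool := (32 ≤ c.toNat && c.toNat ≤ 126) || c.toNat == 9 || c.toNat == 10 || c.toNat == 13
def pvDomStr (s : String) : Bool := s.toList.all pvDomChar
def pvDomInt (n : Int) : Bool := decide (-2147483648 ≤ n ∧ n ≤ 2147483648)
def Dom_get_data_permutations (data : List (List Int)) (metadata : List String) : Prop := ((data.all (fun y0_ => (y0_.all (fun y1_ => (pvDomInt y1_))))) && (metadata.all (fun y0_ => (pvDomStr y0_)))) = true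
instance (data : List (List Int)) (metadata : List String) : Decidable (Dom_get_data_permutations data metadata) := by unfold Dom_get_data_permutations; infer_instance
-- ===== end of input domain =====

-- B builds each permuted dataset row-by-row directly, dropping A's intermediate
-- column matrix and its transpose step (objective: simpler).

-- Shared helper: itertools.permutations of a list, in itertools' (index-lexicographic)
-- order; both Pythons call this library function.
def pyPermsAux {α : Type} (n : Nat) (l : List α) : List (List α) :=
  match n with
  | 0 => [[]]
  | Nat.succ m => l.zipIdx.flatMap (fun p => (pyPermsAux m (l.eraseIdx p.2)).map (fun rest => p.1 :: rest))

def pyPerms {α : Type} (l : List α) : List (List α) := pyPermsAux l.length l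

-- row[i] / metadata[i] (Python indexing; the default is never used under Pre_)
def pvGetI (row : List Int) (i : Int) : Int := (PySem.List.pyGet? row i).getD 0
def pvGetS (l : List String) (i : Int) : String := (PySem.List.pyGet? l i).getD ""

-- ===== PORT A =====
def get_data_permutations (data : List (List Int)) (metadata : List String) : List (List (List Int)) × List (List String) :=
  let cols_quantity : Int := ((data.headD []).length : Int)
  let target_column : List Int := data.map (fun row => pvGetI row (cols_quantity - 1))
  let all_index_permutations : List (List Int) := pyPerms (PySem.List.pyRange 0 (cols_quantity - 1) 1)
  all_index_permutations.foldl
    (fun (acc : List (List (List Int)) × List (List String)) options =>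
      let mm := (PySem.List.enumerate options).foldl
        (fun (mm : List (List Int) × List String) p =>
          (mm.1 ++ [data.map (fun row => pvGetI row p.2)], mm.2 ++ [pvGetS metadata p.2]))
        ([], [])
      let matrix := mm.1 ++ [target_column]
      (acc.1 ++ [(List.range (matrix.headD []).length).map (fun i => matrix.map (fun r => r.getD i 0))],
       acc.2 ++ [mm.2 ++ [pvGetS metadata (cols_quantity - 1)]]))
    ([], [])

-- ===== PORT B =====
def get_data_permutations_alt (data : List (List Int)) (metadata : List String) : List (List (List Int)) × List (List String) :=
  let target : Int := ((data.headD []).length : Int) - 1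
  let perms : List (List Int) := pyPerms (PySem.List.pyRange 0 target 1)
  (perms.map (fun options => data.map (fun row => options.map (fun col => pvGetI row col) ++ [pvGetI row target])),
   perms.map (fun options => options.map (fun col => pvGetS metadata col) ++ [pvGetS metadata target]))

-- ===== PRECONDITION & SPEC =====
-- Pre_ excludes exactly the inputs on which Python A raises IndexError:
-- empty data or an empty first row, a row shorter than the first row, or metadata
-- shorter than the first row.
def Pre_get_data_permutations (data : List (List Int)) (metadata : List String) : Prop :=
  data ≠ [] ∧ 0 < (data.headD []).length ∧
  (∀ row ∈ data, (data.headD []).length ≤ row.length) ∧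
  (data.headD []).length ≤ metadata.length
instance (data : List (List Int)) (metadata : List String) : Decidable (Pre_get_data_permutations data metadata) := by unfold Pre_get_data_permutations; infer_instance

def pvWitness_get_data_permutations : List (List Int) × List String := ([[1, 2], [3, 4]], ["a", "b"])

def Spec_get_data_permutations (data : List (List Int)) (metadata : List String) (out : List (List (List Int)) × List (List String)) : Prop := out = get_data_permutations_alt data metadata
instance (data : List (List Int)) (metadata : List String) (out : List (List (List Int)) × List (List String)) : Decidable (Spec_get_data_permutations data metadata out) := by unfold Spec_get_data_permutations; infer_instance

-- ===== CLAIM (what is proved, stated in full; the proofs are below) =====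
def Claim_equal_get_data_permutations : Prop := ∀ (data : List (List Int)) (metadata : List String), Dom_get_data_permutations data metadata → Pre_get_data_permutations data metadata → Spec_get_data_permutations data metadata (get_data_permutations data metadata)

-- ===== LEMMAS AND PROOFS =====

theorem getD_map_lt {α β : Type} (l : List α) (f : α → β) {i : Nat} (h : i < l.length) (d : β) :
    (l.map f).getD i d = f l[i] := by
  rw [List.getD_eq_getElem?_getD, List.getElem?_map, List.getElem?_eq_getElem h]
  rfl

-- transposing the column matrix (options' columns plus the target column) gives
-- exactly B's row-major construction
theorem transpose_core (data : List (List Int)) (options : List Int) (t : Int) :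
    (List.range ((options.map (fun col => data.map (fun row => pvGetI row col))
        ++ [data.map (fun row => pvGetI row t)]).headD []).length).map
      (fun i => (options.map (fun col => data.map (fun row => pvGetI row col))
        ++ [data.map (fun row => pvGetI row t)]).map (fun r => r.getD i 0))
    = data.map (fun row => options.map (fun col => pvGetI row col) ++ [pvGetI row t]) := by
  have hlen : ((options.map (fun col => data.map (fun row => pvGetI row col))
      ++ [data.map (fun row => pvGetI row t)]).headD []).length = data.length := by
    cases options with
    | nil => simp
    | cons c cs => simp
  rw [hlen]
  apply List.ext_getElem
  · simp
  · intro i h1 h2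
    simp only [List.getElem_map, List.getElem_range, List.map_append, List.map_map, List.map_cons,
      List.map_nil]
    have hi : i < data.length := by simpa using h2
    rw [getD_map_lt data _ hi]
    congr 1
    apply List.map_congr_left
    intro c _
    simp only [Function.comp]
    rw [getD_map_lt data _ hi]

-- A's inner loop over enumerate(options) builds the two lists column-wise
theorem inner_fold (data : List (List Int)) (metadata : List String) (l : List Int) (s : Int)
    (m1 : List (List Int)) (m2 : List String) :
    (PySem.List.enumerate l s).foldl
      (fun (mm : List (List Int) × List String) p =>
        (mm.1 ++ [data.map (fun row => pvGetI row p.2)], mm.2 ++ [pvGetS metadata p.2]))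
      (m1, m2)
    = (m1 ++ l.map (fun col => data.map (fun row => pvGetI row col)),
       m2 ++ l.map (fun col => pvGetS metadata col)) := by
  induction l generalizing s m1 m2 with
  | nil => simp [PySem.List.enumerate_nil]
  | cons x xs ih => simp [PySem.List.enumerate_cons, ih]

-- A's outer loop produces B's two maps
theorem outer_fold (data : List (List Int)) (metadata : List String) (t : Int)
    (L : List (List Int)) (acc1 : List (List (List Int))) (acc2 : List (List String)) :
    L.foldl
      (fun (acc : List (List (List Int)) × List (List String)) options =>
        let mm := (PySem.List.enumerate options).foldl
          (fun (mm : List (List Int) × List String) p =>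
            (mm.1 ++ [data.map (fun row => pvGetI row p.2)], mm.2 ++ [pvGetS metadata p.2]))
          ([], [])
        let matrix := mm.1 ++ [data.map (fun row => pvGetI row t)]
        (acc.1 ++ [(List.range (matrix.headD []).length).map (fun i => matrix.map (fun r => r.getD i 0))],
         acc.2 ++ [mm.2 ++ [pvGetS metadata t]]))
      (acc1, acc2)
    = (acc1 ++ L.map (fun options => data.map (fun row => options.map (fun col => pvGetI row col) ++ [pvGetI row t])),
       acc2 ++ L.map (fun options => options.map (fun col => pvGetS metadata col) ++ [pvGetS metadata t])) := by
  induction L generalizing acc1 acc2 with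
  | nil => simp
  | cons o L' ih =>
    rw [List.foldl_cons, ih]
    simp only [inner_fold, List.nil_append]
    rw [transpose_core data o t]
    simp

theorem get_data_permutations_eq (data : List (List Int)) (metadata : List String) :
    get_data_permutations data metadata = get_data_permutations_alt data metadata := by
  unfold get_data_permutations get_data_permutations_alt
  rw [outer_fold data metadata (((data.headD []).length : Int) - 1)]
  simp

-- ===== VERDICT (by name: the statement is the Claim_ definition above) =====
theorem get_data_permutations_spec : Claim_equal_get_data_permutations := by
  intro data metadata _ _
  unfold Spec_get_data_permutations
  exact get_data_permutations_eq data metadata
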